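-- pv_equiv track=rewrite | github.com/ryantigi254/Media-Technology-Module | src/ssc/pipeline.py | _union_xywh
-- ===== SOURCE A (Python) =====
-- def _union_xywh(bboxes: list[tuple[int, int, int, int]]) -> tuple[int, int, int, int] | None:
--     if not bboxes:
--         return None
--     xs = [x for x, _, _, _ in bboxes]
--     ys = [y for _, y, _, _ in bboxes]
--     x2s = [x + w for x, _, w, _ in bboxes]
--     y2s = [y + h for _, y, _, h in bboxes]
--     x1 = int(min(xs))
--     y1 = int(min(ys))
--     x2 = int(max(x2s))
--     y2 = int(max(y2s))
--     return (x1, y1, x2 - x1, y2 - y1)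
-- ===== SOURCE B (Python) =====
-- def _union_xywh(bboxes: list[tuple[int, int, int, int]]) -> tuple[int, int, int, int] | None:
--     if not bboxes:
--         return None
--     x, y, w, h = bboxes[0]
--     min_x, min_y, max_x2, max_y2 = x, y, x + w, y + h
--     for x, y, w, h in bboxes[1:]:
--         if x < min_x:
--             min_x = x
--         if y < min_y:
--             min_y = y
--         if x + w > max_x2:
--             max_x2 = x + w
--         if y + h > max_y2:
--             max_y2 = y + h
--     return (min_x, min_y, max_x2 - min_x, max_y2 - min_y)
-- ===== Notes on version B (the rewrite author's own statement) =====
-- stated objective: simpler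
-- what changed: Replaces the four intermediate list comprehensions plus four separate min/max scans with a single pass that maintains four running extremes seeded from the first box.
import Mathlib
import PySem

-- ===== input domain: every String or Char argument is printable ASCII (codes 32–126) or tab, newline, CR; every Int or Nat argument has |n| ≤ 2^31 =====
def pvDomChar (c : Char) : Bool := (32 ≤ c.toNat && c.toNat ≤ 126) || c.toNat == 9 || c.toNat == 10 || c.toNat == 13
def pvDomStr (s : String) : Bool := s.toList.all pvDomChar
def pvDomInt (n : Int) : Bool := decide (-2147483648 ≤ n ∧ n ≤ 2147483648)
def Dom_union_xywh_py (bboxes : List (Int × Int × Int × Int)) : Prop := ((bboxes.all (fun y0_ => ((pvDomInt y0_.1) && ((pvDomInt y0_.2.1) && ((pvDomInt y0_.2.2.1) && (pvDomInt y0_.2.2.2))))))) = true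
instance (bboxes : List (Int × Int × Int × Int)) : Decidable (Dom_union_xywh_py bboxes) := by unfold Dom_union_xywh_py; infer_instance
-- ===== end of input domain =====

-- B replaces A's four list comprehensions plus four min/max scans by one pass
-- keeping four running extremes; objective: simpler (single pass, no temporaries).

-- ===== PORT A =====
-- A builds the four comprehension lists over the whole nonempty list, then takes
-- min/max (PySem.List.min?/max?; the lists are nonempty so the `.getD 0` default
-- is never used — Python's min/max only raise on empty input).
def union_xywh_py (bboxes : List (Int × Int × Int × Int)) : Option (Int × Int × Int × Int) :=
  match bboxes with
  | [] => none
  | _ =>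
    let xs := bboxes.map (fun b => b.1)
    let ys := bboxes.map (fun b => b.2.1)
    let x2s := bboxes.map (fun b => b.1 + b.2.2.1)
    let y2s := bboxes.map (fun b => b.2.1 + b.2.2.2)
    let x1 := (PySem.List.min? xs (fun v => v)).getD 0
    let y1 := (PySem.List.min? ys (fun v => v)).getD 0
    let x2 := (PySem.List.max? x2s (fun v => v)).getD 0
    let y2 := (PySem.List.max? y2s (fun v => v)).getD 0
    some (x1, y1, x2 - x1, y2 - y1)

-- ===== PORT B =====
-- single pass over the tail, updating four running extremes with comparisons
def union_xywh_py_alt (bboxes : List (Int × Int × Int × Int)) : Option (Int × Int × Int × Int) :=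
  match bboxes with
  | [] => none
  | (x, y, w, h) :: rest =>
    let s := rest.foldl
      (fun (st : Int × Int × Int × Int) b =>
        let (mx, my, mX, mY) := st
        let (x, y, w, h) := b
        let mx := if x < mx then x else mx
        let my := if y < my then y else my
        let mX := if x + w > mX then x + w else mX
        let mY := if y + h > mY then y + h else mY
        (mx, my, mX, mY))
      (x, y, x + w, y + h)
    some (s.1, s.2.1, s.2.2.1 - s.1, s.2.2.2 - s.2.1)

-- ===== PRECONDITION & SPEC =====
def Spec_union_xywh_py (bboxes : List (Int × Int × Int × Int)) (out : Option (Int × Int × Int × Int)) : Prop := out = union_xywh_py_alt bboxes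
instance (bboxes : List (Int × Int × Int × Int)) (out : Option (Int × Int × Int × Int)) : Decidable (Spec_union_xywh_py bboxes out) := by unfold Spec_union_xywh_py; infer_instance

-- ===== CLAIM (what is proved, stated in full; the proofs are below) =====
def Claim_equal_union_xywh_py : Prop := ∀ (bboxes : List (Int × Int × Int × Int)), Dom_union_xywh_py bboxes → Spec_union_xywh_py bboxes (union_xywh_py bboxes)

-- ===== LEMMAS AND PROOFS =====

-- The four-component fold of B computes componentwise the running min/min/max/max folds.
theorem fold4_eq (rest : List (Int × Int × Int × Int)) (a b c d : Int) :
    rest.foldl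
      (fun (st : Int × Int × Int × Int) bb =>
        let (mx, my, mX, mY) := st
        let (x, y, w, h) := bb
        let mx := if x < mx then x else mx
        let my := if y < my then y else my
        let mX := if x + w > mX then x + w else mX
        let mY := if y + h > mY then y + h else mY
        (mx, my, mX, mY))
      (a, b, c, d)
    = ((rest.map (fun bb => bb.1)).foldl min a,
       (rest.map (fun bb => bb.2.1)).foldl min b,
       (rest.map (fun bb => bb.1 + bb.2.2.1)).foldl max c,
       (rest.map (fun bb => bb.2.1 + bb.2.2.2)).foldl max d) := by
  induction rest generalizing a b c d with
  | nil => rfl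
  | cons hd tl ih =>
    obtain ⟨x, y, w, h⟩ := hd
    have h1 : (if x < a then x else a) = min a x := by rw [min_def]; split_ifs <;> omega
    have h2 : (if y < b then y else b) = min b y := by rw [min_def]; split_ifs <;> omega
    have h3 : (if x + w > c then x + w else c) = max c (x + w) := by
      rw [max_def]; split_ifs <;> omega
    have h4 : (if y + h > d then y + h else d) = max d (y + h) := by
      rw [max_def]; split_ifs <;> omega
    simp only [List.foldl_cons, List.map_cons]
    rw [h1, h2, h3, h4, ih]

-- ===== VERDICT (by name: the statement is the Claim_ definition above) =====
theorem union_xywh_py_spec : Claim_equal_union_xywh_py := by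
  intro bboxes _
  unfold Spec_union_xywh_py union_xywh_py union_xywh_py_alt
  match bboxes with
  | [] => rfl
  | (x, y, w, h) :: rest =>
    simp only [List.map, PySem.List.min?_id_cons, PySem.List.max?_id_cons, Option.getD_some,
      fold4_eq]
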